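-- pv_equiv track=rewrite | github.com/jackyecho1029/ceramic-voices-monitoring | scrapers/instagram.py | analyze_competitor_data
-- ===== SOURCE A (Python) =====
-- def analyze_competitor_data(data):
--     """分析竞品数据并生成洞察"""
--     insights = []
--
--     # 统计成功获取的账号
--     success_count = sum(1 for item in data if item.get('status') == 'success')
--     insights.append({
--         "type": "success_rate",
--         "message": f"成功获取 {success_count}/{len(data)} 个竞品账号的公开数据"
--     })
--
--     # 识别需要登录的账号
--     login_required = [item for item in data if item.get('status') == 'login_required']
--     if login_required:
--         insights.append({
--             "type": "login_required",
--             "message": f"以下账号需要登录才能查看完整数据：{', '.join([item['username'] for item in login_required])}"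
--         })
--         insights.append({
--             "type": "recommendation",
--             "message": "建议使用 Instaloader 等专业工具进行深度数据收集"
--         })
--
--     return insights
-- ===== SOURCE B (Python) =====
-- def analyze_competitor_data(data):
--     """分析竞品数据并生成洞察 — single pass instead of three traversals"""
--     success_count = 0
--     login_names = []
--     total = 0
--     for item in data:
--         total += 1
--         status = item.get('status')
--         if status == 'success':
--             success_count += 1
--         elif status == 'login_required':
--             login_names.append(item['username'])
--     insights = [{
--         "type": "success_rate",
--         "message": f"成功获取 {success_count}/{total} 个竞品账号的公开数据"
--     }]
--     if login_names:
--         insights.append({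
--             "type": "login_required",
--             "message": "以下账号需要登录才能查看完整数据：" + ", ".join(login_names)
--         })
--         insights.append({
--             "type": "recommendation",
--             "message": "建议使用 Instaloader 等专业工具进行深度数据收集"
--         })
--     return insights
-- ===== Notes on version B (the rewrite author's own statement) =====
-- stated objective: alternative
-- what changed: B makes one pass over data with an explicit loop maintaining success_count, login_required usernames and the total, instead of A's three separate traversals (count generator, filter comprehension, inner username comprehension).
import Mathlib
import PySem

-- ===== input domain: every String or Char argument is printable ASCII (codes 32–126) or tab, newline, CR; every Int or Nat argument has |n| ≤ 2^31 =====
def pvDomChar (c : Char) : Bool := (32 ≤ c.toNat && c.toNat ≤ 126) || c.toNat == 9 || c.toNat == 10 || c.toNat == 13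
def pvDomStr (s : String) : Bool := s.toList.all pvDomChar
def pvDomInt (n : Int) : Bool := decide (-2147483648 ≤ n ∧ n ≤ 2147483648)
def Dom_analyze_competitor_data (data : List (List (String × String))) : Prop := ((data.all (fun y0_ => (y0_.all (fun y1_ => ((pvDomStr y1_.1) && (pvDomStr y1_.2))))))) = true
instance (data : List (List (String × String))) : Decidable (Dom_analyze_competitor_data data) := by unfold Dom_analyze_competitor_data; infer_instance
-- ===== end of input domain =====

-- One honest line: B is a single explicit pass keeping (success_count, login usernames, total)
-- instead of A's three separate traversals; same cost, different decomposition.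
-- Dicts are association lists (first-match lookup); item['username'] is ported as .getD "" and
-- the KeyError inputs are excluded by Pre_.

-- ===== PORT A =====
def analyze_competitor_data (data : List (List (String × String))) : List (List (String × String)) :=
  let success_count : Int :=
    data.foldl (fun acc item => if item.lookup "status" == some "success" then acc + 1 else acc) 0
  let insights : List (List (String × String)) :=
    [[("type", "success_rate"),
      ("message", "成功获取 " ++ PySem.Int.toStr success_count ++ "/" ++
        PySem.Int.toStr (data.length : Int) ++ " 个竞品账号的公开数据")]]
  let login_required := data.filter (fun item => item.lookup "status" == some "login_required")
  if login_required.isEmpty then insights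
  else
    insights ++
      [[("type", "login_required"),
        ("message", "以下账号需要登录才能查看完整数据：" ++
          PySem.Str.join ", " (login_required.map (fun item => (item.lookup "username").getD "")))],
       [("type", "recommendation"),
        ("message", "建议使用 Instaloader 等专业工具进行深度数据收集")]]

-- ===== PORT B =====
-- loop body of B's single pass (state: success_count, login usernames, total)
def stepB (acc : Int × List String × Int) (item : List (String × String)) : Int × List String × Int :=
  let status := item.lookup "status"
  if status == some "success" then (acc.1 + 1, acc.2.1, acc.2.2 + 1)
  else if status == some "login_required" then
    (acc.1, acc.2.1 ++ [(item.lookup "username").getD ""], acc.2.2 + 1)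
  else (acc.1, acc.2.1, acc.2.2 + 1)

def analyze_competitor_data_alt (data : List (List (String × String))) : List (List (String × String)) :=
  let st : Int × List String × Int := data.foldl stepB (0, [], 0)
  let insights : List (List (String × String)) :=
    [[("type", "success_rate"),
      ("message", "成功获取 " ++ PySem.Int.toStr st.1 ++ "/" ++
        PySem.Int.toStr st.2.2 ++ " 个竞品账号的公开数据")]]
  if st.2.1.isEmpty then insights
  else
    insights ++
      [[("type", "login_required"),
        ("message", "以下账号需要登录才能查看完整数据：" ++ PySem.Str.join ", " st.2.1)],
       [("type", "recommendation"),
        ("message", "建议使用 Instaloader 等专业工具进行深度数据收集")]]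

-- ===== PRECONDITION & SPEC =====
-- Pre_ excludes exactly the inputs where Python A raises KeyError: an item whose status is
-- 'login_required' but which has no 'username' key.
def Pre_analyze_competitor_data (data : List (List (String × String))) : Prop :=
  ∀ item ∈ data, item.lookup "status" = some "login_required" → (item.lookup "username").isSome
instance (data : List (List (String × String))) : Decidable (Pre_analyze_competitor_data data) := by
  unfold Pre_analyze_competitor_data; infer_instance
def pvWitness_analyze_competitor_data : (List (List (String × String))) :=
  [[("status", "success")], [("status", "login_required"), ("username", "bob")]]
def Spec_analyze_competitor_data (data : List (List (String × String))) (out : List (List (String × String))) : Prop := out = analyze_competitor_data_alt data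
instance (data : List (List (String × String))) (out : List (List (String × String))) : Decidable (Spec_analyze_competitor_data data out) := by unfold Spec_analyze_competitor_data; infer_instance

-- ===== CLAIM (what is proved, stated in full; the proofs are below) =====
def Claim_equal_analyze_competitor_data : Prop := ∀ (data : List (List (String × String))), Dom_analyze_competitor_data data → Pre_analyze_competitor_data data → Spec_analyze_competitor_data data (analyze_competitor_data data)

-- ===== LEMMAS AND PROOFS =====
-- B's single fold, characterised: it returns A's three traversal results at once.
theorem alt_fold_eq (data : List (List (String × String))) (c : Int) (ns : List String) (t : Int) :
    data.foldl stepB (c, ns, t)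
    = (c + ((data.countP (fun item => item.lookup "status" == some "success")) : Int),
       ns ++ (data.filter (fun item => item.lookup "status" == some "login_required")).map
              (fun item => (item.lookup "username").getD ""),
       t + (data.length : Int)) := by
  induction data generalizing c ns t with
  | nil => simp
  | cons item rest ih =>
    rw [List.foldl_cons]
    by_cases hs : item.lookup "status" = some "success"
    · have hstep : stepB (c, ns, t) item = (c + 1, ns, t + 1) := by simp [stepB, hs]
      have hl : item.lookup "status" ≠ some "login_required" := by simp [hs]
      rw [hstep, ih]
      simp only [List.countP_cons, List.filter_cons, List.length_cons, beq_iff_eq, hs,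
        Prod.mk.injEq]
      refine ⟨by push_cast; ring, by simp, by push_cast; ring⟩
    · by_cases hl : item.lookup "status" = some "login_required"
      · have hstep : stepB (c, ns, t) item
            = (c, ns ++ [(item.lookup "username").getD ""], t + 1) := by
          simp [stepB, hl]
        rw [hstep, ih]
        simp only [List.countP_cons, List.filter_cons, List.length_cons, beq_iff_eq, hl,
          Prod.mk.injEq]
        refine ⟨by simp, by simp, by push_cast; ring⟩
      · have hstep : stepB (c, ns, t) item = (c, ns, t + 1) := by simp [stepB, hs, hl]
        rw [hstep, ih]
        simp only [List.countP_cons, List.filter_cons, List.length_cons, beq_iff_eq, hs, hl,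
          Prod.mk.injEq]
        refine ⟨by push_cast; ring, by simp, by push_cast; ring⟩

-- ===== VERDICT (by name: the statement is the Claim_ definition above) =====
theorem analyze_competitor_data_spec : Claim_equal_analyze_competitor_data := by
  intro data _ _
  unfold Spec_analyze_competitor_data analyze_competitor_data analyze_competitor_data_alt
  rw [alt_fold_eq]
  rw [PySem.List.foldl_if_add_one]
  simp [List.isEmpty_iff]
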